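-- pv_equiv track=rewrite | github.com/barawn/picoblaze_utils | pblaze-cc.py | find_prev_label
-- ===== SOURCE A (Python) =====
-- def find_prev_label(lst_block, level):
--     label_bb = '(HEAD)'
--     for tmp_label, tmp_block in reversed(lst_block):
--         tmp_level = tmp_block[0][0]
--         if tmp_level <= level:
--             label_bb = tmp_label
--             break
--     return label_bb
-- ===== SOURCE B (Python) =====
-- def find_prev_label(lst_block, level):
--     # forward single pass with a last-wins accumulator (no reversed(), no break);
--     # since this pass visits every block, it guards against empty rows instead of crashing
--     label_bb = '(HEAD)'
--     for tmp_label, tmp_block in lst_block: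
--         if tmp_block and tmp_block[0] and tmp_block[0][0] <= level:
--             label_bb = tmp_label
--     return label_bb
-- ===== Notes on version B (the rewrite author's own statement) =====
-- stated objective: alternative
-- what changed: Replaced the reverse scan with early break by a forward single pass that keeps the label of the last well-formed block whose level fits in a last-wins accumulator.
import Mathlib
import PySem

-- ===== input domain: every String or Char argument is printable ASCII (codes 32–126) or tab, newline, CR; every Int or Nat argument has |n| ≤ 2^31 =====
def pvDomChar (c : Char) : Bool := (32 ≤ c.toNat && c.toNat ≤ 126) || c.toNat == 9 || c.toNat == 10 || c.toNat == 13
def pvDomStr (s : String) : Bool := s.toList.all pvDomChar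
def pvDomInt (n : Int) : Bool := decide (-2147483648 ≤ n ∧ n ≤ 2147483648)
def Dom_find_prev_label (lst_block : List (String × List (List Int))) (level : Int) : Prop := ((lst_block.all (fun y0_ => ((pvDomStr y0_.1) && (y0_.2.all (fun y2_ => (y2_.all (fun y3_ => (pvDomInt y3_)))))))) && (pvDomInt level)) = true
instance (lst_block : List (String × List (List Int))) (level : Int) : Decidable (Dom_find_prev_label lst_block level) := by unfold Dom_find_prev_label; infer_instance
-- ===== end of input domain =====

-- B replaces A's reversed scan with early break by a forward last-wins accumulator pass that guards empty blocks; same result wherever A returns, same cost (objective: alternative). A mutates nothing.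


-- ===== PORT A =====
-- the loop over reversed(lst_block) with break, as structural recursion over the reversed list
def find_prev_label_loopA (rev : List (String × List (List Int))) (level : Int) : String :=
  match rev with
  | [] => "(HEAD)"
  | (tmp_label, tmp_block) :: rest =>
    -- tmp_block[0][0]; inside Pre_ this access is never reached out of range (pyGetD = pyGet? there)
    if PySem.List.pyGetD (PySem.List.pyGetD tmp_block 0 []) 0 0 ≤ level then tmp_label
    else find_prev_label_loopA rest level

def find_prev_label (lst_block : List (String × List (List Int))) (level : Int) : String :=
  find_prev_label_loopA lst_block.reverse level

-- ===== PORT B =====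
-- forward single pass, last-wins accumulator; the 'tmp_block and tmp_block[0] and …' guard of Source B
def find_prev_label_alt (lst_block : List (String × List (List Int))) (level : Int) : String :=
  lst_block.foldl
    (fun label_bb p =>
      if p.2 ≠ [] ∧ p.2.headI ≠ [] ∧ PySem.List.pyGetD (PySem.List.pyGetD p.2 0 []) 0 0 ≤ level
      then p.1 else label_bb)
    "(HEAD)"

-- ===== PRECONDITION & SPEC =====
-- a malformed block: no rows, or an empty first row (tmp_block[0][0] would raise IndexError)
def pvBad (p : String × List (List Int)) : Prop := p.2 = [] ∨ p.2.headI = []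

-- Pre_ excludes exactly the inputs on which A raises IndexError: those where some malformed
-- block is not followed by a well-formed block whose level fits (A's reverse scan then reaches
-- the malformed block and tmp_block[0][0] raises); everywhere A returns, Pre_ holds.
def Pre_find_prev_label (lst_block : List (String × List (List Int))) (level : Int) : Prop :=
  ∀ i : Fin lst_block.length, pvBad lst_block[i] →
    ∃ j : Fin lst_block.length, (i : ℕ) < (j : ℕ) ∧ ¬ pvBad lst_block[j] ∧
      PySem.List.pyGetD (PySem.List.pyGetD (lst_block[j].2) 0 []) 0 0 ≤ level
instance (lst_block : List (String × List (List Int))) (level : Int) : Decidable (Pre_find_prev_label lst_block level) := by unfold Pre_find_prev_label pvBad; infer_instance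

def pvWitness_find_prev_label : (List (String × List (List Int))) × Int := ([("a", [[0]]), ("b", [[1], [2]])], 0)

def Spec_find_prev_label (lst_block : List (String × List (List Int))) (level : Int) (out : String) : Prop := out = find_prev_label_alt lst_block level
instance (lst_block : List (String × List (List Int))) (level : Int) (out : String) : Decidable (Spec_find_prev_label lst_block level out) := by unfold Spec_find_prev_label; infer_instance

-- ===== CLAIM (what is proved, stated in full; the proofs are below) =====
def Claim_equal_find_prev_label : Prop := ∀ (lst_block : List (String × List (List Int))) (level : Int), Dom_find_prev_label lst_block level → Pre_find_prev_label lst_block level → Spec_find_prev_label lst_block level (find_prev_label lst_block level)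

-- ===== LEMMAS AND PROOFS =====

-- the last block cannot be malformed under Pre_
theorem pre_last_not_bad (l : List (String × List (List Int))) (x : String × List (List Int)) (level : Int)
    (h : Pre_find_prev_label (l ++ [x]) level) : ¬ pvBad x := by
  intro hb
  have hlen : l.length < (l ++ [x]).length := by simp
  have hx : (l ++ [x])[(⟨l.length, hlen⟩ : Fin (l ++ [x]).length)] = x := by
    simp
  obtain ⟨j, hj, _⟩ := h ⟨l.length, hlen⟩ (by rw [hx]; exact hb)
  have hjl : (j : ℕ) < l.length + 1 := by simpa using j.isLt
  have hj' : l.length < (j : ℕ) := hj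
  omega

-- Pre_ restricts to the prefix when the last block is well-formed but does not fit
theorem pre_append_drop (l : List (String × List (List Int))) (x : String × List (List Int)) (level : Int)
    (h : Pre_find_prev_label (l ++ [x]) level)
    (hf : ¬ PySem.List.pyGetD (PySem.List.pyGetD x.2 0 []) 0 0 ≤ level) :
    Pre_find_prev_label l level := by
  intro i hbi
  have hi' : (i : ℕ) < (l ++ [x]).length := by rw [List.length_append]; exact Nat.lt_add_right _ i.isLt
  have hget : (l ++ [x])[(⟨(i : ℕ), hi'⟩ : Fin (l ++ [x]).length)] = l[i] := by
    simp [List.getElem_append_left i.isLt]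
  obtain ⟨j, hij, hgj, hfj⟩ := h ⟨(i : ℕ), hi'⟩ (by rw [hget]; exact hbi)
  have hj := j.isLt
  simp at hj
  by_cases hjl : (j : ℕ) < l.length
  · refine ⟨⟨(j : ℕ), hjl⟩, hij, ?_, ?_⟩
    · have : (l ++ [x])[j] = l[(j : ℕ)] := by
        simp [List.getElem_append_left hjl]
      rwa [this] at hgj
    · have : (l ++ [x])[j] = l[(j : ℕ)] := by
        simp [List.getElem_append_left hjl]
      rwa [this] at hfj
  · exfalso
    have hjeq : (j : ℕ) = l.length := by omega
    have : (l ++ [x])[j] = x := by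
      rcases j with ⟨jv, hjv⟩
      subst hjeq
      simp
    rw [this] at hfj
    exact hf hfj

theorem find_prev_label_eq (lst_block : List (String × List (List Int))) (level : Int)
    (h : Pre_find_prev_label lst_block level) :
    find_prev_label lst_block level = find_prev_label_alt lst_block level := by
  induction lst_block using List.reverseRecOn with
  | nil => rfl
  | append_singleton l x ih =>
    have hgood : ¬ pvBad x := pre_last_not_bad l x level h
    have hx2 : x.2 ≠ [] ∧ x.2.headI ≠ [] := by
      unfold pvBad at hgood; push Not at hgood; exact hgood
    by_cases hf : PySem.List.pyGetD (PySem.List.pyGetD x.2 0 []) 0 0 ≤ level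
    · simp [find_prev_label, find_prev_label_alt, find_prev_label_loopA, hf, hx2.1, hx2.2]
    · have hpre := pre_append_drop l x level h hf
      have := ih hpre
      simp [find_prev_label, find_prev_label_alt, find_prev_label_loopA, hf] at this ⊢
      exact this

-- ===== VERDICT (by name: the statement is the Claim_ definition above) =====
theorem find_prev_label_spec : Claim_equal_find_prev_label := by
  intro lst level _ hp
  exact find_prev_label_eq lst level hp
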